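-- pv_equiv track=rewrite | github.com/MrSuicideParrot/IA-TP3 | rota.py | counterDay
-- ===== SOURCE A (Python) =====
-- def counterDay(dayI, dayF):
--     dias = ['mo', 'tu', 'we', 'th', 'fr', 'sa', 'su']
--     startIndex = dias.index(dayI)
--     endIndex = dias.index(dayF)
--     count = 0
--     while startIndex != endIndex:
--         startIndex = (8 + startIndex) % 7
--         count += 1
--     return count + 1
-- ===== SOURCE B (Python) =====
-- def counterDay(dayI, dayF):
--     dias = ['mo', 'tu', 'we', 'th', 'fr', 'sa', 'su']
--     startIndex = dias.index(dayI)
--     endIndex = dias.index(dayF)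
--     return ((endIndex - startIndex) % 7) + 1
-- ===== Notes on version B (the rewrite author's own statement) =====
-- stated objective: simpler
-- what changed: Replaces the while-loop that steps around the week one index at a time with a single closed-form return of ((endIndex - startIndex) % 7) + 1; both dias.index lookups are kept, so where A raises ValueError on unknown day names B raises too (those inputs are outside Pre_).
import Mathlib
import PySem

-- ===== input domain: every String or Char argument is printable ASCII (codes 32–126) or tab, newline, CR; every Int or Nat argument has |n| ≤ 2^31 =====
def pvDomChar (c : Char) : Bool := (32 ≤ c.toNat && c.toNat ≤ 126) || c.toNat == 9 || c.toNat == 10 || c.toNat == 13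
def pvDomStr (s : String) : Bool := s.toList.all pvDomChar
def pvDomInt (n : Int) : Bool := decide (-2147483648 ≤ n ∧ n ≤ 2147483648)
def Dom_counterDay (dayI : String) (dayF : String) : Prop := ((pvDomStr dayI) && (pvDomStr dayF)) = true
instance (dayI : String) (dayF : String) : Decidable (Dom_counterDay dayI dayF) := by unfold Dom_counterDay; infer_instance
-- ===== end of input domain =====

-- B replaces A's step-by-step while-loop around the week with the closed form ((endIndex - startIndex) % 7) + 1 (simpler).


-- ===== PORT A =====
def counterDayDiasA : List String := ["mo", "tu", "we", "th", "fr", "sa", "su"]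

-- the while-loop: fuel 7 only makes the recursion total (the loop runs at most 6 times for indices 0..6)
def counterDayLoopA : Nat → Int → Int → Int → Int
  | 0, _, _, count => count
  | fuel + 1, startIndex, endIndex, count =>
    if startIndex ≠ endIndex then
      counterDayLoopA fuel (PySem.Int.mod (8 + startIndex) 7) endIndex (count + 1)
    else count

def counterDay (dayI : String) (dayF : String) : Int :=
  match PySem.List.index? counterDayDiasA dayI, PySem.List.index? counterDayDiasA dayF with
  | some startIndex, some endIndex => counterDayLoopA 7 (startIndex : Int) (endIndex : Int) 0 + 1
  | _, _ => 0  -- ValueError: outside Pre_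

-- ===== PORT B =====
def counterDayDiasB : List String := ["mo", "tu", "we", "th", "fr", "sa", "su"]

def counterDay_alt (dayI : String) (dayF : String) : Int :=
  match PySem.List.index? counterDayDiasB dayI with
  | none => 0  -- ValueError: outside Pre_
  | some startIndex =>
    match PySem.List.index? counterDayDiasB dayF with
    | none => 0  -- ValueError: outside Pre_
    | some endIndex => PySem.Int.mod ((endIndex : Int) - (startIndex : Int)) 7 + 1

-- ===== PRECONDITION & SPEC =====
-- Pre_ excludes exactly the inputs on which A's dias.index raises ValueError (unknown day name).
def Pre_counterDay (dayI : String) (dayF : String) : Prop :=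
  dayI ∈ (["mo", "tu", "we", "th", "fr", "sa", "su"] : List String) ∧
  dayF ∈ (["mo", "tu", "we", "th", "fr", "sa", "su"] : List String)
instance (dayI : String) (dayF : String) : Decidable (Pre_counterDay dayI dayF) := by
  unfold Pre_counterDay; infer_instance

def pvWitness_counterDay : String × String := ("we", "mo")

def Spec_counterDay (dayI : String) (dayF : String) (out : Int) : Prop := out = counterDay_alt dayI dayF
instance (dayI : String) (dayF : String) (out : Int) : Decidable (Spec_counterDay dayI dayF out) := by unfold Spec_counterDay; infer_instance

-- ===== CLAIM (what is proved, stated in full; the proofs are below) =====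
def Claim_equal_counterDay : Prop := ∀ (dayI : String) (dayF : String), Dom_counterDay dayI dayF → Pre_counterDay dayI dayF → Spec_counterDay dayI dayF (counterDay dayI dayF)

-- ===== LEMMAS AND PROOFS =====

-- ===== VERDICT (by name: the statement is the Claim_ definition above) =====
theorem counterDay_spec : Claim_equal_counterDay := by
  intro dayI dayF _ hpre
  unfold Spec_counterDay
  obtain ⟨hI, hF⟩ := hpre
  fin_cases hI <;> fin_cases hF <;> decide
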